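-- pv_equiv track=rewrite | github.com/sb2bg/walrus | benchmarks/25_struct_particles.py | particle_benchmark
-- ===== SOURCE A (Python) =====
-- class Particle:
--     def __init__(self, x, y, vx, vy):
--         self.x = x
--         self.y = y
--         self.vx = vx
--         self.vy = vy
--
--     def step(self, bias):
--         self.x = self.x + self.vx + bias
--         self.y = self.y + self.vy + (bias % 3)
--         self.vx = self.vx + ((bias + 1) % 3) - 1
--         self.vy = self.vy + ((bias + 2) % 5) - 2
--         return self.x + self.y + self.vx + self.vy
--
-- def build_particles(n):
--     particles = []
--     for i in range(n):
--         particles.append(Particle(i, i * 2, i % 7, (i * 3) % 11))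
--     return particles
--
-- def particle_benchmark(count, steps):
--     particles = build_particles(count)
--     total = 0
--     for step in range(steps):
--         bias = step % 5
--         for i in range(len(particles)):
--             total += particles[i].step(bias)
--     return total
-- ===== SOURCE B (Python) =====
-- def particle_benchmark(count, steps):
--     # aggregate simulation: per-step deltas are particle-independent,
--     # so track only the sums of x, y, vx, vy over all particles
--     n = max(count, 0)
--     sx = sy = svx = svy = 0
--     for i in range(count):
--         sx += i
--         sy += i * 2
--         svx += i % 7
--         svy += (i * 3) % 11
--     total = 0
--     for step in range(steps):
--         bias = step % 5
--         sx += svx + n * bias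
--         sy += svy + n * (bias % 3)
--         svx += n * ((bias + 1) % 3 - 1)
--         svy += n * ((bias + 2) % 5 - 2)
--         total += sx + sy + svx + svy
--     return total
-- ===== Notes on version B (the rewrite author's own statement) =====
-- stated objective: faster
-- what changed: Instead of simulating every particle at every step, B tracks only the aggregate sums of x, y, vx, vy over all particles and updates them once per step, since the per-step deltas are particle-independent.
import Mathlib
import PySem

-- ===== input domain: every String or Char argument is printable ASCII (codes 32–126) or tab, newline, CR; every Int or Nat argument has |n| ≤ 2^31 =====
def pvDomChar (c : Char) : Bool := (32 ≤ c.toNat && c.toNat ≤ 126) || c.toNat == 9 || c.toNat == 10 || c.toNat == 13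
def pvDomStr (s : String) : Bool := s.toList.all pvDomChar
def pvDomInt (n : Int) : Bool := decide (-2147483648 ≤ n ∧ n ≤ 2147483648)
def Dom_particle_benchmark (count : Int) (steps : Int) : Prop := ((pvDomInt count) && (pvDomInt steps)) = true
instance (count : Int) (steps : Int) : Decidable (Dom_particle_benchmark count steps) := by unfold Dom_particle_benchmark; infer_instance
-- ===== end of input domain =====

-- B replaces the per-particle simulation by tracking only the aggregate sums of
-- x, y, vx, vy (the per-step deltas are particle-independent): O(count+steps) vs O(count*steps).

-- ===== PORT A =====
structure PvParticle where
  x : Int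
  y : Int
  vx : Int
  vy : Int
deriving DecidableEq, Repr

-- Particle.step: mutate the four fields, return x + y + vx + vy
def pvStep (p : PvParticle) (bias : Int) : PvParticle × Int :=
  let x := p.x + p.vx + bias
  let y := p.y + p.vy + PySem.Int.mod bias 3
  let vx := p.vx + PySem.Int.mod (bias + 1) 3 - 1
  let vy := p.vy + PySem.Int.mod (bias + 2) 5 - 2
  (⟨x, y, vx, vy⟩, x + y + vx + vy)

def pvBuildParticles (n : Int) : List PvParticle :=
  (PySem.List.pyRange 0 n 1).map
    (fun i => ⟨i, i * 2, PySem.Int.mod i 7, PySem.Int.mod (i * 3) 11⟩)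

-- inner loop "for i in range(len(particles)): total += particles[i].step(bias)"
-- (each particle is replaced by its stepped version, in order)
def pvInner (ps : List PvParticle) (bias : Int) (total : Int) : List PvParticle × Int :=
  match ps with
  | [] => ([], total)
  | p :: rest =>
    let r := pvStep p bias
    let rec' := pvInner rest bias (total + r.2)
    (r.1 :: rec'.1, rec'.2)

def particle_benchmark (count : Int) (steps : Int) : Int :=
  let particles := pvBuildParticles count
  let st := (PySem.List.pyRange 0 steps 1).foldl
    (fun (st : List PvParticle × Int) step =>
      let bias := PySem.Int.mod step 5
      pvInner st.1 bias st.2) (particles, 0)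
  st.2

-- ===== PORT B =====
def pvInitSums (count : Int) : Int × Int × Int × Int :=
  (PySem.List.pyRange 0 count 1).foldl
    (fun (s : Int × Int × Int × Int) i =>
      (s.1 + i, s.2.1 + i * 2, s.2.2.1 + PySem.Int.mod i 7, s.2.2.2 + PySem.Int.mod (i * 3) 11))
    (0, 0, 0, 0)

def pvStepAgg (n : Int) (s : Int × Int × Int × Int × Int) (step : Int) : Int × Int × Int × Int × Int :=
  let bias := PySem.Int.mod step 5
  let sx := s.1 + s.2.2.1 + n * bias
  let sy := s.2.1 + s.2.2.2.1 + n * (PySem.Int.mod bias 3)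
  let svx := s.2.2.1 + n * (PySem.Int.mod (bias + 1) 3 - 1)
  let svy := s.2.2.2.1 + n * (PySem.Int.mod (bias + 2) 5 - 2)
  (sx, sy, svx, svy, s.2.2.2.2 + (sx + sy + svx + svy))

def particle_benchmark_alt (count : Int) (steps : Int) : Int :=
  let n := max count 0
  let init := pvInitSums count
  let fin := (PySem.List.pyRange 0 steps 1).foldl (pvStepAgg n)
    (init.1, init.2.1, init.2.2.1, init.2.2.2, 0)
  fin.2.2.2.2

-- ===== PRECONDITION & SPEC =====
def Spec_particle_benchmark (count : Int) (steps : Int) (out : Int) : Prop := out = particle_benchmark_alt count steps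
instance (count : Int) (steps : Int) (out : Int) : Decidable (Spec_particle_benchmark count steps out) := by unfold Spec_particle_benchmark; infer_instance

-- ===== CLAIM (what is proved, stated in full; the proofs are below) =====
def Claim_equal_particle_benchmark : Prop := ∀ (count : Int) (steps : Int), Dom_particle_benchmark count steps → Spec_particle_benchmark count steps (particle_benchmark count steps)

-- ===== LEMMAS AND PROOFS =====

def pvSX (ps : List PvParticle) : Int := (ps.map PvParticle.x).sum
def pvSY (ps : List PvParticle) : Int := (ps.map PvParticle.y).sum
def pvSVX (ps : List PvParticle) : Int := (ps.map PvParticle.vx).sum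
def pvSVY (ps : List PvParticle) : Int := (ps.map PvParticle.vy).sum

lemma pvInner_spec (bias : Int) : ∀ (ps : List PvParticle) (total : Int),
    pvInner ps bias total =
      (ps.map (fun p => (pvStep p bias).1),
       total + pvSX ps + pvSY ps + 2 * pvSVX ps + 2 * pvSVY ps
         + (ps.length : Int) *
            (bias + PySem.Int.mod bias 3 + (PySem.Int.mod (bias + 1) 3 - 1)
              + (PySem.Int.mod (bias + 2) 5 - 2))) := by
  intro ps
  induction ps with
  | nil => intro total; simp [pvInner, pvSX, pvSY, pvSVX, pvSVY]
  | cons p rest ih =>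
    intro total
    simp only [pvInner, ih, pvStep, pvSX, pvSY, pvSVX, pvSVY, List.map_cons, List.sum_cons,
      List.length_cons]
    refine Prod.ext rfl ?_
    push_cast
    ring

lemma pvSums_step (bias : Int) (ps : List PvParticle) :
    pvSX (ps.map (fun p => (pvStep p bias).1))
        = pvSX ps + pvSVX ps + (ps.length : Int) * bias
    ∧ pvSY (ps.map (fun p => (pvStep p bias).1))
        = pvSY ps + pvSVY ps + (ps.length : Int) * PySem.Int.mod bias 3
    ∧ pvSVX (ps.map (fun p => (pvStep p bias).1))
        = pvSVX ps + (ps.length : Int) * (PySem.Int.mod (bias + 1) 3 - 1)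
    ∧ pvSVY (ps.map (fun p => (pvStep p bias).1))
        = pvSVY ps + (ps.length : Int) * (PySem.Int.mod (bias + 2) 5 - 2) := by
  induction ps with
  | nil => simp [pvSX, pvSY, pvSVX, pvSVY]
  | cons p rest ih =>
    obtain ⟨h1, h2, h3, h4⟩ := ih
    refine ⟨?_, ?_, ?_, ?_⟩ <;>
      simp only [pvSX, pvSY, pvSVX, pvSVY, pvStep, List.map_cons, List.sum_cons,
        List.length_cons] at * <;>
      push_cast <;> [rw [h1]; rw [h2]; rw [h3]; rw [h4]] <;> ring

lemma pvOuter (n : Int) : ∀ (bs : List Int) (ps : List PvParticle) (t : Int),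
    (ps.length : Int) = n →
    ((bs.foldl (fun (st : List PvParticle × Int) step =>
        let bias := PySem.Int.mod step 5
        pvInner st.1 bias st.2) (ps, t)).2
      = (bs.foldl (pvStepAgg n) (pvSX ps, pvSY ps, pvSVX ps, pvSVY ps, t)).2.2.2.2) := by
  intro bs
  induction bs with
  | nil => intro ps t _; rfl
  | cons b bs ih =>
    intro ps t hlen
    simp only [List.foldl_cons]
    rw [pvInner_spec]
    obtain ⟨h1, h2, h3, h4⟩ := pvSums_step (PySem.Int.mod b 5) ps
    rw [ih _ _ (by simpa using hlen)]
    have hst : pvStepAgg n (pvSX ps, pvSY ps, pvSVX ps, pvSVY ps, t) b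
        = (pvSX ps + pvSVX ps + n * PySem.Int.mod b 5,
           pvSY ps + pvSVY ps + n * PySem.Int.mod (PySem.Int.mod b 5) 3,
           pvSVX ps + n * (PySem.Int.mod (PySem.Int.mod b 5 + 1) 3 - 1),
           pvSVY ps + n * (PySem.Int.mod (PySem.Int.mod b 5 + 2) 5 - 2),
           t + pvSX ps + pvSY ps + 2 * pvSVX ps + 2 * pvSVY ps
             + n * (PySem.Int.mod b 5 + PySem.Int.mod (PySem.Int.mod b 5) 3
                 + (PySem.Int.mod (PySem.Int.mod b 5 + 1) 3 - 1)
                 + (PySem.Int.mod (PySem.Int.mod b 5 + 2) 5 - 2))) := by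
      simp only [pvStepAgg]
      refine Prod.ext rfl (Prod.ext rfl (Prod.ext rfl (Prod.ext rfl ?_)))
      ring
    rw [hst, h1, h2, h3, h4, hlen]

lemma pvInit_spec : ∀ (is : List Int) (a b c d : Int),
    is.foldl (fun (s : Int × Int × Int × Int) i =>
        (s.1 + i, s.2.1 + i * 2, s.2.2.1 + PySem.Int.mod i 7, s.2.2.2 + PySem.Int.mod (i * 3) 11))
      (a, b, c, d)
    = (a + pvSX (is.map (fun i => ⟨i, i * 2, PySem.Int.mod i 7, PySem.Int.mod (i * 3) 11⟩)),
       b + pvSY (is.map (fun i => ⟨i, i * 2, PySem.Int.mod i 7, PySem.Int.mod (i * 3) 11⟩)),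
       c + pvSVX (is.map (fun i => ⟨i, i * 2, PySem.Int.mod i 7, PySem.Int.mod (i * 3) 11⟩)),
       d + pvSVY (is.map (fun i => ⟨i, i * 2, PySem.Int.mod i 7, PySem.Int.mod (i * 3) 11⟩))) := by
  intro is
  induction is with
  | nil => intro a b c d; simp [pvSX, pvSY, pvSVX, pvSVY]
  | cons i rest ih =>
    intro a b c d
    simp only [List.foldl_cons, ih, pvSX, pvSY, pvSVX, pvSVY, List.map_cons, List.sum_cons]
    refine Prod.ext (by ring) (Prod.ext (by ring) (Prod.ext (by ring) (by ring)))

lemma pvBuild_length (count : Int) : ((pvBuildParticles count).length : Int) = max count 0 := by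
  simp only [pvBuildParticles, List.length_map, PySem.List.length_pyRange_one]
  omega

-- ===== VERDICT (by name: the statement is the Claim_ definition above) =====
theorem particle_benchmark_spec : Claim_equal_particle_benchmark := by
  intro count steps _
  unfold Spec_particle_benchmark particle_benchmark particle_benchmark_alt
  rw [pvOuter (max count 0) _ _ _ (pvBuild_length count)]
  have h := pvInit_spec (PySem.List.pyRange 0 count 1) 0 0 0 0
  simp only [zero_add] at h
  simp only [pvInitSums, pvBuildParticles, h]
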